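-- pv_equiv track=rewrite | github.com/camjoe/trading_strategies | scripts/documentation_ui/finance/sync_ui_docs.py | sort_terms_for_section
-- ===== SOURCE A (Python) =====
-- UI_TERM_LABELS = {
--     "DTE": "DTE (Days to Expiration)",
-- }
--
-- def sort_terms_for_section(terms: list[dict[str, str]], existing_order: list[str]) -> list[dict[str, str]]:
--     position = {name: index for index, name in enumerate(existing_order)}
--     known: list[dict[str, str]] = []
--     unknown: list[dict[str, str]] = []
--     for term in terms:
--         label = UI_TERM_LABELS.get(term["term"], term["term"])
--         if label in position:
--             known.append(term)
--         else:
--             unknown.append(term)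
--
--     known.sort(key=lambda item: position[UI_TERM_LABELS.get(item["term"], item["term"])])
--     unknown.sort(key=lambda item: item["term"].lower())
--     return known + unknown
-- ===== SOURCE B (Python) =====
-- UI_TERM_LABELS = {
--     "DTE": "DTE (Days to Expiration)",
-- }
--
-- def sort_terms_for_section(terms: list[dict[str, str]], existing_order: list[str]) -> list[dict[str, str]]:
--     position = {name: index for index, name in enumerate(existing_order)}
--     n = len(existing_order)
--
--     def key(term):
--         label = UI_TERM_LABELS.get(term["term"], term["term"])
--         return (position.get(label, n), "" if label in position else term["term"].lower())
--
--     return sorted(terms, key=key)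
-- ===== Notes on version B (the rewrite author's own statement) =====
-- stated objective: simpler
-- what changed: Replaces the explicit known/unknown partition loop, the two separate sorts and the list concatenation with a single stable sorted() over terms using a composite key (position.get(label, len(existing_order)), '' if label in position else term['term'].lower()); stability makes grouping and tie-breaking identical.
import Mathlib
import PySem

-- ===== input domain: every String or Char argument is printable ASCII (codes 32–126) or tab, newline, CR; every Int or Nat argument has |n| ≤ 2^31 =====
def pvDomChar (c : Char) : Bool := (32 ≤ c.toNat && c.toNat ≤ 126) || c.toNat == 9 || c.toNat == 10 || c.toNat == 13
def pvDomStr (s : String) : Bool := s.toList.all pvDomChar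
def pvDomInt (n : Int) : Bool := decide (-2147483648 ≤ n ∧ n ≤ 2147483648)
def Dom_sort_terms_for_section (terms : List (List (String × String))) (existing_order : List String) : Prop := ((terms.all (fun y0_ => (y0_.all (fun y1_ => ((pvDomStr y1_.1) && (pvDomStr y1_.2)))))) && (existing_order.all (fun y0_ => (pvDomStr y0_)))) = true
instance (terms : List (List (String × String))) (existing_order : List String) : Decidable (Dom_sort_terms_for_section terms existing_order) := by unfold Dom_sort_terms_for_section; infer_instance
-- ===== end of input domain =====

-- ===== PORT A =====
-- B replaces A's partition loop, two separate sorts and concatenation by ONE stable sort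
-- with a composite (group-position, lowercase-tiebreak) key; same cost, simpler shape.

-- module constant UI_TERM_LABELS
def pvUiTermLabels : PySem.Dict String String := PySem.Dict.mk [("DTE", "DTE (Days to Expiration)")]

-- term["term"]; the "" default is never reached under Pre_ (Python raises KeyError there)
def pvTermOf (t : List (String × String)) : String := ((PySem.Dict.mk t).get? "term").getD ""

-- UI_TERM_LABELS.get(term["term"], term["term"])
def pvLabelOf (t : List (String × String)) : String := pvUiTermLabels.getD (pvTermOf t) (pvTermOf t)

-- position = {name: index for index, name in enumerate(existing_order)}
def pvPosition (existing_order : List String) : PySem.Dict String Int :=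
  (PySem.List.enumerate existing_order 0).foldl (fun d q => d.insert q.2 q.1) PySem.Dict.empty

def sort_terms_for_section (terms : List (List (String × String))) (existing_order : List String) : List (List (String × String)) :=
  let position := pvPosition existing_order
  -- the partition loop over terms, appending to known / unknown
  let ku := terms.foldl
    (fun (acc : List (List (String × String)) × List (List (String × String))) term =>
      if position.contains (pvLabelOf term) then (acc.1 ++ [term], acc.2) else (acc.1, acc.2 ++ [term]))
    ([], [])
  -- known.sort(key=lambda item: position[label(item)]); label is in position on every known item, so getD is exact
  let known := PySem.List.sorted ku.1 (fun item => position.getD (pvLabelOf item) 0) false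
  -- unknown.sort(key=lambda item: item["term"].lower())
  let unknown := PySem.List.sorted ku.2 (fun item => PySem.Str.lower (pvTermOf item)) false
  known ++ unknown

-- ===== PORT B =====
def sort_terms_for_section_alt (terms : List (List (String × String))) (existing_order : List String) : List (List (String × String)) :=
  let position := pvPosition existing_order
  let n : Int := (existing_order.length : Int)
  -- sorted(terms, key=lambda t: (position.get(label, n), "" if label in position else t["term"].lower()))
  PySem.List.sorted2 terms
    (fun t => position.getD (pvLabelOf t) n)
    (fun t => if position.contains (pvLabelOf t) then "" else PySem.Str.lower (pvTermOf t))
    false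

-- ===== PRECONDITION & SPEC =====
-- Pre_ excludes exactly the inputs where some term dict has no "term" key: there the Python A
-- (and the Python B alike) raises KeyError.
def Pre_sort_terms_for_section (terms : List (List (String × String))) (existing_order : List String) : Prop :=
  (terms.all (fun t => t.any (fun kv => kv.1 == "term"))) = true
instance (terms : List (List (String × String))) (existing_order : List String) : Decidable (Pre_sort_terms_for_section terms existing_order) := by unfold Pre_sort_terms_for_section; infer_instance

def pvWitness_sort_terms_for_section : (List (List (String × String))) × List String :=
  ([[("term", "DTE")], [("term", "alpha")]], ["DTE (Days to Expiration)", "beta"])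

def Spec_sort_terms_for_section (terms : List (List (String × String))) (existing_order : List String) (out : List (List (String × String))) : Prop := out = sort_terms_for_section_alt terms existing_order
instance (terms : List (List (String × String))) (existing_order : List String) (out : List (List (String × String))) : Decidable (Spec_sort_terms_for_section terms existing_order out) := by unfold Spec_sort_terms_for_section; infer_instance

-- ===== CLAIM (what is proved, stated in full; the proofs are below) =====
def Claim_equal_sort_terms_for_section : Prop := ∀ (terms : List (List (String × String))) (existing_order : List String), Dom_sort_terms_for_section terms existing_order → Pre_sort_terms_for_section terms existing_order → Spec_sort_terms_for_section terms existing_order (sort_terms_for_section terms existing_order)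

-- ===== LEMMAS AND PROOFS =====

-- inserting x into ps ++ qs lands inside ps when x goes before everything in qs
theorem pv_insertBy_append_left {α : Type} (before : α → α → Bool) (x : α) :
    ∀ (ps qs : List α), (∀ y ∈ qs, before x y = true) →
      PySem.List.insertBy before x (ps ++ qs) = PySem.List.insertBy before x ps ++ qs := by
  intro ps
  induction ps with
  | nil =>
    intro qs h
    cases qs with
    | nil => simp [PySem.List.insertBy]
    | cons y ys => simp [PySem.List.insertBy, h y (by simp)]
  | cons z zs ih =>
    intro qs h
    by_cases hb : before x z = true
    · simp [PySem.List.insertBy, hb]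
    · simp [PySem.List.insertBy, hb, ih qs h]

-- inserting x into ps ++ qs lands inside qs when x goes before nothing in ps
theorem pv_insertBy_append_right {α : Type} (before : α → α → Bool) (x : α) :
    ∀ (ps qs : List α), (∀ y ∈ ps, before x y = false) →
      PySem.List.insertBy before x (ps ++ qs) = ps ++ PySem.List.insertBy before x qs := by
  intro ps
  induction ps with
  | nil => intro qs _; simp
  | cons z zs ih =>
    intro qs h
    have hz : before x z = false := h z (by simp)
    simp [PySem.List.insertBy, hz, ih qs (fun y hy => h y (by simp [hy]))]

-- insertBy only looks at comparisons of x against members of the accumulator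
theorem pv_insertBy_congr {α : Type} (before before' : α → α → Bool) (x : α) :
    ∀ (acc : List α), (∀ y ∈ acc, before x y = before' x y) →
      PySem.List.insertBy before x acc = PySem.List.insertBy before' x acc := by
  intro acc
  induction acc with
  | nil => intro _; simp [PySem.List.insertBy]
  | cons y ys ih =>
    intro h
    have hy : before x y = before' x y := h y (by simp)
    by_cases hb : before' x y = true
    · simp [PySem.List.insertBy, hy, hb]
    · simp [PySem.List.insertBy, hy, hb, ih (fun y hy => h y (by simp [hy]))]

-- stable insertion sort along a comparator that puts the p-group strictly first splits
-- into the two groups, each insertion-sorted separately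
theorem pv_foldl_ins_partition {α : Type} (before : α → α → Bool) (p : α → Bool)
    (h1 : ∀ a b, p a = true → p b = false → before a b = true)
    (h2 : ∀ a b, p a = false → p b = true → before a b = false) :
    ∀ (l ps qs : List α), (∀ y ∈ ps, p y = true) → (∀ y ∈ qs, p y = false) →
      l.foldl (fun acc x => PySem.List.insertBy before x acc) (ps ++ qs)
        = (l.filter p).foldl (fun acc x => PySem.List.insertBy before x acc) ps
          ++ (l.filter (fun x => !p x)).foldl (fun acc x => PySem.List.insertBy before x acc) qs := by
  intro l
  induction l with
  | nil => intro ps qs _ _; simp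
  | cons x t ih =>
    intro ps qs hps hqs
    by_cases hp : p x = true
    · have hstep : PySem.List.insertBy before x (ps ++ qs) = PySem.List.insertBy before x ps ++ qs :=
        pv_insertBy_append_left before x ps qs (fun y hy => h1 x y hp (hqs y hy))
      have hps' : ∀ y ∈ PySem.List.insertBy before x ps, p y = true := by
        intro y hy
        rcases (PySem.List.mem_insertBy before x y ps).1 hy with rfl | hy'
        · exact hp
        · exact hps y hy'
      simp only [List.foldl_cons, hstep, List.filter_cons, hp]
      simpa using ih (PySem.List.insertBy before x ps) qs hps' hqs
    · have hp' : p x = false := by simpa using hp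
      have hstep : PySem.List.insertBy before x (ps ++ qs) = ps ++ PySem.List.insertBy before x qs :=
        pv_insertBy_append_right before x ps qs (fun y hy => h2 x y hp' (hps y hy))
      have hqs' : ∀ y ∈ PySem.List.insertBy before x qs, p y = false := by
        intro y hy
        rcases (PySem.List.mem_insertBy before x y qs).1 hy with rfl | hy'
        · exact hp'
        · exact hqs y hy'
      simp only [List.foldl_cons, hstep, List.filter_cons, hp']
      simpa [hp'] using ih ps (PySem.List.insertBy before x qs) hps hqs'

-- within one group the two comparators agree, so the insertion sorts agree
theorem pv_foldl_ins_congr {α : Type} (before before' : α → α → Bool) (p : α → Bool)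
    (h : ∀ a b, p a = true → p b = true → before a b = before' a b) :
    ∀ (l acc : List α), (∀ x ∈ l, p x = true) → (∀ y ∈ acc, p y = true) →
      l.foldl (fun acc x => PySem.List.insertBy before x acc) acc
        = l.foldl (fun acc x => PySem.List.insertBy before' x acc) acc := by
  intro l
  induction l with
  | nil => intro acc _ _; simp
  | cons x t ih =>
    intro acc hl hacc
    have hx : p x = true := hl x (by simp)
    have hstep : PySem.List.insertBy before x acc = PySem.List.insertBy before' x acc :=
      pv_insertBy_congr before before' x acc (fun y hy => h x y hx (hacc y hy))
    have hacc' : ∀ y ∈ PySem.List.insertBy before' x acc, p y = true := by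
      intro y hy
      rcases (PySem.List.mem_insertBy before' x y acc).1 hy with rfl | hy'
      · exact hx
      · exact hacc y hy'
    simp only [List.foldl_cons, hstep]
    exact ih (PySem.List.insertBy before' x acc) (fun z hz => hl z (by simp [hz])) hacc'

-- indices produced by enumerate are bounded by the list length
theorem pv_enumerate_bound {α : Type} :
    ∀ (xs : List α) (s : Int) (q : Int × α), q ∈ PySem.List.enumerate xs s →
      s ≤ q.1 ∧ q.1 < s + xs.length := by
  intro xs
  induction xs with
  | nil => intro s q hq; simp [PySem.List.enumerate] at hq
  | cons x t ih =>
    intro s q hq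
    simp only [PySem.List.enumerate, List.mem_cons] at hq
    rcases hq with rfl | hq
    · simp
    · have := ih (s + 1) q hq
      simp only [List.length_cons]
      push_cast
      omega

-- every value stored by the position-building fold stays below the bound
theorem pv_posfold_value_lt (N : Int) :
    ∀ (l : List (Int × String)) (d : PySem.Dict String Int),
      (∀ k v, d.get? k = some v → v < N) → (∀ q ∈ l, q.1 < N) →
      ∀ k v, (l.foldl (fun d q => d.insert q.2 q.1) d).get? k = some v → v < N := by
  intro l
  induction l with
  | nil => intro d hd _ k v hget; exact hd k v hget
  | cons q t ih =>
    intro d hd hl k v hget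
    refine ih (d.insert q.2 q.1) ?_ (fun r hr => hl r (by simp [hr])) k v hget
    intro k' v' hg
    rw [PySem.Dict.get?_insert] at hg
    by_cases hk : k' = q.2
    · simp [hk] at hg; subst hg; exact hl q (by simp)
    · simp [hk] at hg; exact hd k' v' hg

-- every value of the position dict is < len(existing_order)
theorem pv_position_value_lt (existing_order : List String) (k : String) (v : Int)
    (h : (pvPosition existing_order).get? k = some v) : v < (existing_order.length : Int) := by
  refine pv_posfold_value_lt (existing_order.length : Int) _ PySem.Dict.empty ?_ ?_ k v h
  · intro k v hg; simp [PySem.Dict.get?_empty] at hg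
  · intro q hq
    have := pv_enumerate_bound existing_order 0 q hq
    omega

-- A's partition loop is the pair of filters
theorem pv_partition_loop {α : Type} (p : α → Bool) :
    ∀ (l : List α) (k u : List α),
      l.foldl (fun acc x => if p x then (acc.1 ++ [x], acc.2) else (acc.1, acc.2 ++ [x])) (k, u)
        = (k ++ l.filter p, u ++ l.filter (fun x => !p x)) := by
  intro l
  induction l with
  | nil => intro k u; simp
  | cons x t ih =>
    intro k u
    by_cases hp : p x = true
    · simp [hp, ih]
    · simp only [Bool.not_eq_true] at hp
      simp [hp, ih]

-- ===== VERDICT (by name: the statement is the Claim_ definition above) =====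
theorem sort_terms_for_section_spec : Claim_equal_sort_terms_for_section := by
  intro terms existing_order _ _
  unfold Spec_sort_terms_for_section sort_terms_for_section sort_terms_for_section_alt
  simp only []
  set position := pvPosition existing_order with hpos
  set N : Int := (existing_order.length : Int) with hN
  set p : List (String × String) → Bool := fun t => position.contains (pvLabelOf t) with hp
  set k1 : List (String × String) → Int := fun t => position.getD (pvLabelOf t) N with hk1
  set k2 : List (String × String) → String :=
    fun t => if position.contains (pvLabelOf t) then "" else PySem.Str.lower (pvTermOf t) with hk2
  -- facts about k1
  have hk1_lt : ∀ t, p t = true → k1 t < N := by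
    intro t ht
    have hs : (position.get? (pvLabelOf t)).isSome := by
      rw [← PySem.Dict.contains_eq_isSome_get?]; exact ht
    rcases Option.isSome_iff_exists.1 hs with ⟨v, hv⟩
    have := pv_position_value_lt existing_order (pvLabelOf t) v hv
    simp [hk1, PySem.Dict.getD_eq_get?_getD, hv]
    omega
  have hk1_eq : ∀ t, p t = false → k1 t = N := by
    intro t ht
    simp [hk1, PySem.Dict.getD_of_not_contains _ _ ht]
  have hk1_known : ∀ t, p t = true → k1 t = position.getD (pvLabelOf t) 0 := by
    intro t ht
    have hs : (position.get? (pvLabelOf t)).isSome := by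
      rw [← PySem.Dict.contains_eq_isSome_get?]; exact ht
    rcases Option.isSome_iff_exists.1 hs with ⟨v, hv⟩
    simp [hk1, PySem.Dict.getD_eq_get?_getD, hv]
  -- the composite comparator of B
  set beforeB : List (String × String) → List (String × String) → Bool :=
    fun a b => decide (k1 a < k1 b) || (!decide (k1 b < k1 a) && decide (k2 a < k2 b)) with hbB
  -- B is the insertion-sort fold along beforeB
  have hBfold : PySem.List.sorted2 terms k1 k2 false
      = terms.foldl (fun acc x => PySem.List.insertBy beforeB x acc) [] := by
    rfl
  -- group separation
  have h1 : ∀ a b, p a = true → p b = false → beforeB a b = true := by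
    intro a b ha hb
    have : k1 a < k1 b := by rw [hk1_eq b hb]; exact hk1_lt a ha
    simp [hbB, this]
  have h2 : ∀ a b, p a = false → p b = true → beforeB a b = false := by
    intro a b ha hb
    have hlt : k1 b < k1 a := by rw [hk1_eq a ha]; exact hk1_lt b hb
    have h3 : ¬ (k1 a < k1 b) := by omega
    simp [hbB, h3, hlt]
  -- within the known group beforeB is the position comparator
  have hknown : ∀ a b, p a = true → p b = true →
      beforeB a b = decide (position.getD (pvLabelOf a) 0 < position.getD (pvLabelOf b) 0) := by
    intro a b ha hb
    have ha' : position.contains (pvLabelOf a) = true := by simpa [hp] using ha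
    have hb' : position.contains (pvLabelOf b) = true := by simpa [hp] using hb
    have hka : k2 a = "" := by simp [hk2, ha']
    have hkb : k2 b = "" := by simp [hk2, hb']
    have hnlt : decide (("" : String) < "") = false := decide_eq_false (lt_irrefl _)
    by_cases hlt : k1 a < k1 b
    · simp [hbB, hlt, ← hk1_known a ha, ← hk1_known b hb]
    · simp [hbB, hlt, hka, hkb, ← hk1_known a ha, ← hk1_known b hb]
  -- within the unknown group beforeB is the lowercase comparator
  have hunknown : ∀ a b, p a = false → p b = false →
      beforeB a b = decide (PySem.Str.lower (pvTermOf a) < PySem.Str.lower (pvTermOf b)) := by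
    intro a b ha hb
    have hea : k1 a = N := hk1_eq a ha
    have heb : k1 b = N := hk1_eq b hb
    have ha' : position.contains (pvLabelOf a) = false := by simpa [hp] using ha
    have hb' : position.contains (pvLabelOf b) = false := by simpa [hp] using hb
    have hka : k2 a = PySem.Str.lower (pvTermOf a) := by simp [hk2, ha']
    have hkb : k2 b = PySem.Str.lower (pvTermOf b) := by simp [hk2, hb']
    simp [hbB, hea, heb, hka, hkb]
  -- split B into the two insertion sorts
  have hsplit : terms.foldl (fun acc x => PySem.List.insertBy beforeB x acc) []
      = (terms.filter p).foldl (fun acc x => PySem.List.insertBy beforeB x acc) []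
        ++ (terms.filter (fun x => !p x)).foldl (fun acc x => PySem.List.insertBy beforeB x acc) [] := by
    have := pv_foldl_ins_partition beforeB p h1 h2 terms [] [] (by simp) (by simp)
    simpa using this
  -- replace beforeB by A's comparators on each side
  have hK : (terms.filter p).foldl (fun acc x => PySem.List.insertBy beforeB x acc) []
      = PySem.List.sorted (terms.filter p) (fun item => position.getD (pvLabelOf item) 0) false := by
    rw [PySem.List.sorted_eq_foldl_insertBy]
    exact pv_foldl_ins_congr beforeB _ p hknown (terms.filter p) []
      (fun x hx => (List.mem_filter.1 hx).2) (by simp)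
  have hU : (terms.filter (fun x => !p x)).foldl (fun acc x => PySem.List.insertBy beforeB x acc) []
      = PySem.List.sorted (terms.filter (fun x => !p x)) (fun item => PySem.Str.lower (pvTermOf item)) false := by
    rw [PySem.List.sorted_eq_foldl_insertBy]
    refine pv_foldl_ins_congr beforeB _ (fun x => !p x) ?_ (terms.filter (fun x => !p x)) []
      (fun x hx => (List.mem_filter.1 hx).2) (by simp)
    intro a b ha hb
    exact hunknown a b (by simpa using ha) (by simpa using hb)
  -- A's partition loop is the pair of filters
  have hpart := pv_partition_loop p terms [] []
  simp only [List.nil_append] at hpart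
  rw [hpart]
  rw [hBfold, hsplit, hK, hU]
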